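-- pv_equiv track=rewrite | github.com/Pi3-Unname/PI3_BSI | venv/project/pages/analise_estadia.py | category_costs
-- ===== SOURCE A (Python) =====
-- def category_costs(list_classes, old_values):
--   list_classes.sort()
--   new_list = [None] * len(old_values)
--   for i, old in enumerate(old_values):
--     for index, value in enumerate(list_classes):
--       if(len(list_classes)-1 == index):
--         new_list[i] = f'mais de {value} dias'
--       else:
--         if(value <= old < list_classes[index+1]):
--           new_list[i] = f'{value} a {list_classes[index+1]} dias'
--           break
--   return new_list
-- ===== SOURCE B (Python) =====
-- def _bisect_right(a, x):
--     lo, hi = 0, len(a)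
--     while lo < hi:
--         mid = (lo + hi) // 2
--         if x < a[mid]:
--             hi = mid
--         else:
--             lo = mid + 1
--     return lo
--
--
-- def category_costs(list_classes, old_values):
--     # Same in-place sort side effect as the original.
--     list_classes.sort()
--     m = len(list_classes)
--     new_list = []
--     for old in old_values:
--         if m == 0:
--             new_list.append(None)
--         else:
--             k = _bisect_right(list_classes, old)
--             if 1 <= k <= m - 1:
--                 new_list.append(f'{list_classes[k - 1]} a {list_classes[k]} dias')
--             else:
--                 new_list.append(f'mais de {list_classes[m - 1]} dias')
--     return new_list
-- ===== Notes on version B (the rewrite author's own statement) =====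
-- stated objective: faster
-- what changed: Replaces the inner linear scan over list_classes for every value by one hand-written binary search (bisect_right) per value on the sorted class list, with the unique bucket read off from the insertion point.
import Mathlib
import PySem

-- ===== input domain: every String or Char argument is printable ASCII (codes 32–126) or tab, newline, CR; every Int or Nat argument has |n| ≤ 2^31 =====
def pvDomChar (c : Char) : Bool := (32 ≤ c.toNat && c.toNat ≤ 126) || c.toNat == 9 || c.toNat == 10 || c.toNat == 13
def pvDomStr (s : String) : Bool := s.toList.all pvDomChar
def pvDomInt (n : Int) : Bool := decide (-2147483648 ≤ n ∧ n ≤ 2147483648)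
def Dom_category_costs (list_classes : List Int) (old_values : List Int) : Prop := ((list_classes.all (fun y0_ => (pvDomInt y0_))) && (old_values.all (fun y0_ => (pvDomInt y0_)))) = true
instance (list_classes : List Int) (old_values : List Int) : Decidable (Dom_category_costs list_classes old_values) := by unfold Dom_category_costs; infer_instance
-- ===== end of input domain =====

-- B replaces A's per-value linear scan of the sorted class list by a binary search (faster);
-- equivalence is about the RETURN value; both Pythons sort list_classes in place identically.

-- ===== PORT A =====
-- inner 'for index, value in enumerate(list_classes)' loop of A, for one old value:
-- at the last index it writes 'mais de … dias' (loop then ends); otherwise it writes the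
-- bucket label and breaks when value <= old < list_classes[index+1].
def innerA (old : Int) : List Int → Option String
  | [] => none
  | [v] => some ("mais de " ++ PySem.Int.toStr v ++ " dias")
  | v :: w :: rest =>
      if v ≤ old ∧ old < w then
        some (PySem.Int.toStr v ++ " a " ++ PySem.Int.toStr w ++ " dias")
      else innerA old (w :: rest)

def category_costs (list_classes : List Int) (old_values : List Int) : List (Option String) :=
  let cs := PySem.List.sorted list_classes (fun y => y)
  old_values.map (fun old => innerA old cs)

-- ===== PORT B =====
-- hand-written bisect_right from Source B; the getD index mid is always in range when consulted
def bisectR (a : List Int) (x : Int) (lo hi : Nat) : Nat :=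
  if lo < hi then
    let mid := (lo + hi) / 2
    if x < a.getD mid 0 then bisectR a x lo mid else bisectR a x (mid + 1) hi
  else lo
termination_by hi - lo
decreasing_by all_goals omega

-- body of Source B's per-value branch (indices k-1, k, m-1 are in range when consulted)
def perB (cs : List Int) (m : Nat) (old : Int) : Option String :=
  if m = 0 then none
  else
    let k := bisectR cs old 0 m
    if 1 ≤ k ∧ k ≤ m - 1 then
      some (PySem.Int.toStr (cs.getD (k - 1) 0) ++ " a " ++ PySem.Int.toStr (cs.getD k 0) ++ " dias")
    else
      some ("mais de " ++ PySem.Int.toStr (cs.getD (m - 1) 0) ++ " dias")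

def category_costs_alt (list_classes : List Int) (old_values : List Int) : List (Option String) :=
  let cs := PySem.List.sorted list_classes (fun y => y)
  let m := cs.length
  old_values.map (fun old => perB cs m old)

-- ===== PRECONDITION & SPEC =====
def Spec_category_costs (list_classes : List Int) (old_values : List Int) (out : List (Option String)) : Prop := out = category_costs_alt list_classes old_values
instance (list_classes : List Int) (old_values : List Int) (out : List (Option String)) : Decidable (Spec_category_costs list_classes old_values out) := by unfold Spec_category_costs; infer_instance

-- ===== CLAIM (what is proved, stated in full; the proofs are below) =====
def Claim_equal_category_costs : Prop := ∀ (list_classes : List Int) (old_values : List Int), Dom_category_costs list_classes old_values → Spec_category_costs list_classes old_values (category_costs list_classes old_values)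

-- ===== LEMMAS AND PROOFS =====

-- monotone access on a ≤-sorted list, phrased with getD
theorem getD_mono (cs : List Int) (hs : cs.Pairwise (· ≤ ·)) (i j : Nat)
    (hij : i ≤ j) (hj : j < cs.length) : cs.getD i 0 ≤ cs.getD j 0 := by
  rcases Nat.lt_or_ge i j with hlt | hge
  · rw [List.getD_eq_getElem cs 0 (Nat.lt_of_lt_of_le hlt (Nat.le_of_lt hj)),
        List.getD_eq_getElem cs 0 hj]
    exact (List.pairwise_iff_getElem.mp hs) i j _ _ hlt
  · have : i = j := Nat.le_antisymm hij hge
    subst this; exact le_refl _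

-- bisect_right invariant: the result k separates the elements ≤ x from those > x
theorem bisectR_spec (cs : List Int) (x : Int) (hs : cs.Pairwise (· ≤ ·)) :
    ∀ (n lo hi : Nat), hi - lo ≤ n → lo ≤ hi → hi ≤ cs.length →
    (∀ i, i < lo → cs.getD i 0 ≤ x) →
    (∀ i, hi ≤ i → i < cs.length → x < cs.getD i 0) →
    lo ≤ bisectR cs x lo hi ∧ bisectR cs x lo hi ≤ hi ∧
    (∀ i, i < bisectR cs x lo hi → cs.getD i 0 ≤ x) ∧
    (∀ i, bisectR cs x lo hi ≤ i → i < cs.length → x < cs.getD i 0) := by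
  intro n
  induction n with
  | zero =>
    intro lo hi hfuel hlohi hlen hlow hhigh
    have hle : hi = lo := by omega
    subst hle
    rw [bisectR]; simp only [Nat.lt_irrefl, if_false]
    exact ⟨le_refl _, le_refl _, hlow, hhigh⟩
  | succ n ih =>
    intro lo hi hfuel hlohi hlen hlow hhigh
    by_cases hlt : lo < hi
    · rw [bisectR]; simp only [hlt, if_true]
      by_cases hcmp : x < cs.getD ((lo + hi) / 2) 0
      · simp only [hcmp, if_true]
        obtain ⟨h1, h2, h3, h4⟩ :=
          ih lo ((lo + hi) / 2) (by omega) (by omega) (by omega) hlow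
            (fun i hmi hi2 => lt_of_lt_of_le hcmp (getD_mono cs hs _ i hmi hi2))
        exact ⟨h1, by omega, h3, h4⟩
      · simp only [hcmp, if_false]
        have hx : cs.getD ((lo + hi) / 2) 0 ≤ x := le_of_not_gt hcmp
        obtain ⟨h1, h2, h3, h4⟩ :=
          ih ((lo + hi) / 2 + 1) hi (by omega) (by omega) hlen
            (fun i hi1 => le_trans (getD_mono cs hs i ((lo + hi) / 2) (by omega) (by omega)) hx) hhigh
        exact ⟨by omega, h2, h3, h4⟩
    · have heq : lo = hi := by omega
      subst heq
      rw [bisectR]; simp only [hlt, if_false]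
      exact ⟨le_refl _, le_refl _, hlow, hhigh⟩

-- A's inner scan, characterised by any separating index k
theorem innerA_char : ∀ (cs : List Int) (x : Int) (k : Nat),
    k ≤ cs.length →
    (∀ i, i < k → cs.getD i 0 ≤ x) →
    (∀ i, k ≤ i → i < cs.length → x < cs.getD i 0) →
    innerA x cs =
      if 1 ≤ k ∧ k ≤ cs.length - 1 then
        some (PySem.Int.toStr (cs.getD (k - 1) 0) ++ " a " ++ PySem.Int.toStr (cs.getD k 0) ++ " dias")
      else if cs.length = 0 then none
      else some ("mais de " ++ PySem.Int.toStr (cs.getD (cs.length - 1) 0) ++ " dias")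
  | [], x, k, hk, _, _ => by
    simp only [List.length_nil, Nat.le_zero] at hk
    subst hk
    simp [innerA]
  | [v], x, k, hk, hlow, hhigh => by
    have : ¬ (1 ≤ k ∧ k ≤ ([v] : List Int).length - 1) := by
      rintro ⟨h1, h2⟩; simp at h2; omega
    simp only [this, if_false]
    simp [innerA]
  | v :: w :: rest, x, k, hk, hlow, hhigh => by
    have hlen : (v :: w :: rest).length = rest.length + 2 := by simp
    match k with
    | 0 =>
      have hxv : x < v := by
        have := hhigh 0 (Nat.zero_le _) (by simp)
        simpa using this
      have hcond : ¬ (v ≤ x ∧ x < w) := by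
        intro h; exact absurd h.1 (not_le.mpr hxv)
      rw [innerA]; simp only [hcond, if_false]
      rw [innerA_char (w :: rest) x 0 (Nat.zero_le _)
            (by intro i hi; omega)
            (by intro i _ hi
                have := hhigh (i + 1) (Nat.zero_le _) (by simpa using Nat.succ_lt_succ hi)
                simpa using this)]
      simp
      all_goals rfl
    | 1 =>
      have hvx : v ≤ x := by simpa using hlow 0 Nat.one_pos
      have hxw : x < w := by
        have := hhigh 1 (le_refl _) (by simp)
        simpa using this
      rw [innerA]; simp only [hvx, hxw, and_self, if_true]
      have hcond : 1 ≤ 1 ∧ 1 ≤ (v :: w :: rest).length - 1 := by simp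
      simp only [hcond]
      simp
    | (k' + 2) =>
      have hvx : v ≤ x := by simpa using hlow 0 (by omega)
      have hwx : w ≤ x := by simpa using hlow 1 (by omega)
      have hcond : ¬ (v ≤ x ∧ x < w) := by
        intro h; exact absurd hwx (not_le.mpr h.2)
      rw [innerA]; simp only [hcond, if_false]
      rw [innerA_char (w :: rest) x (k' + 1) (by simp at hk ⊢; omega)
            (by intro i hi
                have := hlow (i + 1) (by omega)
                simpa using this)
            (by intro i hki hi
                have := hhigh (i + 1) (by omega) (by simpa using Nat.succ_lt_succ hi)
                simpa using this)]
      by_cases hub : k' + 2 ≤ (v :: w :: rest).length - 1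
      · have h1 : 1 ≤ k' + 2 ∧ k' + 2 ≤ (v :: w :: rest).length - 1 := ⟨by omega, hub⟩
        have h2 : 1 ≤ k' + 1 ∧ k' + 1 ≤ (w :: rest).length - 1 := by
          simp at hub ⊢; omega
        simp only [h1, h2]
        simp
      · have h1 : ¬ (1 ≤ k' + 2 ∧ k' + 2 ≤ (v :: w :: rest).length - 1) := by
          intro h; exact hub h.2
        have h2 : ¬ (1 ≤ k' + 1 ∧ k' + 1 ≤ (w :: rest).length - 1) := by
          simp at hub ⊢; omega
        simp only [h1, h2, if_false]
        simp
        all_goals rfl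

-- per-element agreement on a sorted class list
theorem perElem_eq (cs : List Int) (hs : cs.Pairwise (· ≤ ·)) (x : Int) :
    innerA x cs = perB cs cs.length x := by
  match cs with
  | [] => simp [innerA, perB]
  | c :: t =>
    have hm : (c :: t).length ≠ 0 := by simp
    obtain ⟨hlo, hhi, hlow, hhigh⟩ :=
      bisectR_spec (c :: t) x hs (c :: t).length 0 (c :: t).length (by omega)
        (Nat.zero_le _) (le_refl _) (by intro i hi; omega) (by intro i h1 h2; omega)
    rw [innerA_char (c :: t) x (bisectR (c :: t) x 0 (c :: t).length) hhi hlow hhigh]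
    simp [perB]

-- ===== VERDICT (by name: the statement is the Claim_ definition above) =====
theorem category_costs_spec : Claim_equal_category_costs := by
  intro list_classes old_values _
  unfold Spec_category_costs category_costs category_costs_alt
  simp only []
  apply List.map_congr_left
  intro x _
  exact perElem_eq (PySem.List.sorted list_classes (fun y => y))
    (PySem.List.sorted_pairwise list_classes (fun y => y)) x
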